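-- pv_equiv track=rewrite | github.com/ankikadey/Competetive-Coding-and-Interview-Questions | DistinctK.py | kth_unique_string
-- ===== SOURCE A (Python) =====
-- def kth_unique_string(strings, k):
--     unique_strings = set()
--
--     for string in strings:
--         sorted_string = ''.join(sorted(string))
--         unique_strings.add((sorted_string, string))
--
--     sorted_unique_strings = sorted(unique_strings)
--
--     if len(sorted_unique_strings) >= k:
--         return sorted_unique_strings[k - 1][1]  # Return the original string
--     else:
--         return ""
-- ===== SOURCE B (Python) =====
-- def kth_unique_string(strings, k):
--     distinct = list(dict.fromkeys(strings))
--     if k < 1 or k > len(distinct):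
--         return ""
--     pool = [(''.join(sorted(s)), s) for s in distinct]
--     i = k - 1
--     while True:
--         pivot = pool[len(pool) // 2]
--         smaller = [p for p in pool if p < pivot]
--         if i < len(smaller):
--             pool = smaller
--         elif i == len(smaller):
--             return pivot[1]
--         else:
--             i -= len(smaller) + 1
--             pool = [p for p in pool if p > pivot]
-- ===== Notes on version B (the rewrite author's own statement) =====
-- stated objective: faster
-- what changed: B replaces A's full sort of the deduplicated (anagram-key, string) pairs by an average-linear quickselect (three-way partition around a middle pivot) for the (k-1)-th order statistic, deduplicating with an ordered dict.fromkeys pass instead of a set of pairs.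
-- intended difference: For k <= 0 (with at least 1-k distinct strings) A's index k-1 wraps around Python-style and returns one of the LAST distinct strings (for k=0 the largest), while B returns "" — the intended out-of-range answer, consistent with A's own "" for k > n. — e.g. on kth_unique_string(["a"], 0): A returns "a", B returns ""
import Mathlib
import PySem

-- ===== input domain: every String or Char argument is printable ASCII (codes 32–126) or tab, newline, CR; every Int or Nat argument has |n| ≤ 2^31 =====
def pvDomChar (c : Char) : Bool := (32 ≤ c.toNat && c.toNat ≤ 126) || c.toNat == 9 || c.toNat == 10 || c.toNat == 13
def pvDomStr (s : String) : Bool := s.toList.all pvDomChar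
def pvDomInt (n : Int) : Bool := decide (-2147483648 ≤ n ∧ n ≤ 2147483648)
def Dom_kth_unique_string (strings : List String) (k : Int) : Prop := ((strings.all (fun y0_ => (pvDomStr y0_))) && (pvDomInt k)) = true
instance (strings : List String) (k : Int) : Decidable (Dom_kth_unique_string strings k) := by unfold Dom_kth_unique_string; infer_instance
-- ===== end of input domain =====

-- B replaces A's full sort of the deduplicated (anagram-key, string) pairs by a quickselect
-- (three-way partition recursion) for the (k-1)-th order statistic; equivalence of the RETURN value.

-- ===== PORT A =====
-- ''.join(sorted(string)) — the anagram key (Python sorts the characters by code point)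
def pvSortChars (s : String) : String := String.ofList (PySem.List.sorted s.toList (fun c => c) false)

def kth_unique_string (strings : List String) (k : Int) : String :=
  -- unique_strings = set(); for string in strings: unique_strings.add((sorted_string, string))
  let unique_strings : PySem.Set (String × String) :=
    strings.foldl (fun us s => us.add (pvSortChars s, s)) PySem.Set.empty
  -- sorted(unique_strings) — Python compares the tuples lexicographically (no ties: the pairs are distinct)
  let sorted_unique := PySem.List.sorted2 unique_strings Prod.fst Prod.snd false
  if k ≤ (sorted_unique.length : Int) then
    match PySem.List.pyGet? sorted_unique (k - 1) with
    | some p => p.2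
    | none => ""            -- IndexError in Python; exactly the inputs Pre_ excludes
  else ""

-- ===== PORT B =====
-- Python's tuple comparison (s1, s2) < (t1, t2) on string pairs (lexicographic, code points)
def pvPairLt (a b : String × String) : Bool :=
  decide (a.1 < b.1 ∨ (a.1 = b.1 ∧ a.2 < b.2))

-- the quickselect loop of Source B: pivot = pool[len(pool)//2]; recurse into the < or > part
def pvQsel (pool : List (String × String)) (i : Int) : String :=
  match hp : pool[pool.length / 2]? with   -- pool[len(pool)//2]: the index is nonnegative, so plain list indexing is exact
  | none => ""                             -- pool empty: unreachable while 0 ≤ i < len(pool)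
  | some pivot =>
    let smaller := pool.filter (fun p => pvPairLt p pivot)
    if i < (smaller.length : Int) then pvQsel smaller i
    else if i = (smaller.length : Int) then pivot.2
    else pvQsel (pool.filter (fun p => pvPairLt pivot p)) (i - ((smaller.length : Int) + 1))
termination_by pool.length
decreasing_by
  all_goals
    have hm : pivot ∈ pool := List.mem_of_getElem? hp
    simp only [List.length_unattach]
    rw [← List.length_attach (l := pool)]
    exact List.length_filter_lt_length_iff_exists.mpr
      ⟨⟨pivot, hm⟩, List.mem_attach _ _, by simp [pvPairLt]⟩

def kth_unique_string_alt (strings : List String) (k : Int) : String :=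
  let distinct := PySem.List.dedup strings          -- list(dict.fromkeys(strings))
  if k < 1 ∨ (distinct.length : Int) < k then ""
  else pvQsel (distinct.map (fun s => (pvSortChars s, s))) (k - 1)

-- ===== PRECONDITION & SPEC =====
-- Pre_ excludes exactly the inputs where A raises IndexError: k ≤ 0 so far below zero that the
-- wrapped-around index k-1 falls off the front of the sorted list of distinct strings.
def Pre_kth_unique_string (strings : List String) (k : Int) : Prop :=
  1 - ((PySem.List.dedup strings).length : Int) ≤ k
instance (strings : List String) (k : Int) : Decidable (Pre_kth_unique_string strings k) := by
  unfold Pre_kth_unique_string; infer_instance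
def pvWitness_kth_unique_string : List String × Int := (["ba", "ab", "ba"], 2)

-- On inputs with k ≤ 0 A's index k-1 wraps around Python-style and returns one of the LAST distinct
-- strings (for k = 0 the largest), while B returns "" — the intended out-of-range answer, consistent
-- with A's own "" for k > n.
def D_kth_unique_string (strings : List String) (k : Int) : Prop := k ≤ 0
instance (strings : List String) (k : Int) : Decidable (D_kth_unique_string strings k) := by
  unfold D_kth_unique_string; infer_instance

def Spec_kth_unique_string (strings : List String) (k : Int) (out : String) : Prop :=
  ¬ D_kth_unique_string strings k → out = kth_unique_string_alt strings k
instance (strings : List String) (k : Int) (out : String) : Decidable (Spec_kth_unique_string strings k out) := by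
  unfold Spec_kth_unique_string; infer_instance

def pvDiffWitness_kth_unique_string : List String × Int := (["a"], 0)
def pvDiffWitnessOut_kth_unique_string : String × String := ("a", "")

-- ===== CLAIM (what is proved, stated in full; the proofs are below) =====
def Claim_unchanged_kth_unique_string : Prop := ∀ (strings : List String) (k : Int), Dom_kth_unique_string strings k → Pre_kth_unique_string strings k → Spec_kth_unique_string strings k (kth_unique_string strings k)
def Claim_changed_kth_unique_string : Prop := Dom_kth_unique_string (pvDiffWitness_kth_unique_string.1) (pvDiffWitness_kth_unique_string.2) ∧ Pre_kth_unique_string (pvDiffWitness_kth_unique_string.1) (pvDiffWitness_kth_unique_string.2) ∧ D_kth_unique_string (pvDiffWitness_kth_unique_string.1) (pvDiffWitness_kth_unique_string.2) ∧ kth_unique_string (pvDiffWitness_kth_unique_string.1) (pvDiffWitness_kth_unique_string.2) = pvDiffWitnessOut_kth_unique_string.1 ∧ kth_unique_string_alt (pvDiffWitness_kth_unique_string.1) (pvDiffWitness_kth_unique_string.2) = pvDiffWitnessOut_kth_unique_string.2 ∧ pvDiffWitnessOut_kth_unique_string.1 ≠ pvDiffWitnessOut_kth_unique_string.2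

-- ===== LEMMAS AND PROOFS =====

-- A sorts the pairs as Python tuples; that comparison is the lexicographic (Lex) order on the pair
lemma pv_sorted2_eq_sorted_toLex (xs : List (String × String)) :
    PySem.List.sorted2 xs Prod.fst Prod.snd false
      = PySem.List.sorted xs (fun p => toLex p) false := by
  simp only [PySem.List.sorted2, PySem.List.sorted]
  congr 1
  funext acc x
  congr 1
  funext a b
  simp only [Prod.Lex.lt_iff, ofLex_toLex]
  rcases lt_trichotomy a.1 b.1 with h | h | h
  · simp [h]
  · simp [h]
  · simp [asymm h, ne_of_gt h, h]

lemma pvPairLt_iff (a b : String × String) :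
    pvPairLt a b = true ↔ (toLex a : Lex (String × String)) < toLex b := by
  simp [pvPairLt, Prod.Lex.lt_iff]

-- the three-way partition of pool around a member pivot, for a duplicate-free pool
lemma pv_partition (pool : List (String × String)) (hnd : pool.Nodup)
    (pivot : String × String) (hm : pivot ∈ pool) :
    (pool.filter (fun p => pvPairLt p pivot) ++ pivot :: pool.filter (fun p => pvPairLt pivot p)).Perm pool := by
  have htri : ∀ a b : String × String, a ≠ b → (pvPairLt a b = true ∨ pvPairLt b a = true) := by
    intro a b hne
    rcases lt_trichotomy (toLex a : Lex (String × String)) (toLex b) with h | h | h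
    · exact Or.inl ((pvPairLt_iff a b).mpr h)
    · exact absurd (toLex.injective h) hne
    · exact Or.inr ((pvPairLt_iff b a).mpr h)
  have hSm : ∀ {a}, a ∈ pool.filter (fun p => pvPairLt p pivot) → a ≠ pivot := by
    intro a ha
    have := (List.mem_filter.mp ha).2
    intro he; subst he
    simp [pvPairLt] at this
  have hGt : ∀ {a}, a ∈ pool.filter (fun p => pvPairLt pivot p) → a ≠ pivot := by
    intro a ha
    have := (List.mem_filter.mp ha).2
    intro he; subst he
    simp [pvPairLt] at this
  have hdisj : ∀ {a}, a ∈ pool.filter (fun p => pvPairLt p pivot) →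
      a ∉ pool.filter (fun p => pvPairLt pivot p) := by
    intro a h1 h2
    have l1 := (pvPairLt_iff a pivot).mp (List.mem_filter.mp h1).2
    have l2 := (pvPairLt_iff pivot a).mp (List.mem_filter.mp h2).2
    exact absurd (l1.trans l2) (lt_irrefl _)
  have hnodup : (pool.filter (fun p => pvPairLt p pivot) ++ pivot :: pool.filter (fun p => pvPairLt pivot p)).Nodup := by
    rw [List.nodup_append]
    refine ⟨hnd.filter _, ?_, ?_⟩
    · exact List.nodup_cons.mpr ⟨fun h => hGt h rfl, hnd.filter _⟩
    · intro a ha b hb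
      rcases List.mem_cons.mp hb with h | h
      · subst h; exact hSm ha
      · intro he; subst he; exact hdisj ha h
  refine (List.perm_ext_iff_of_nodup hnodup hnd).mpr ?_
  intro a
  simp only [List.mem_append, List.mem_cons, List.mem_filter]
  constructor
  · rintro (⟨h, _⟩ | h | ⟨h, _⟩)
    · exact h
    · exact h ▸ hm
    · exact h
  · intro ha
    by_cases he : a = pivot
    · exact Or.inr (Or.inl he)
    · rcases htri a pivot he with h | h
      · exact Or.inl ⟨ha, h⟩
      · exact Or.inr (Or.inr ⟨ha, h⟩)

-- pairwise-strict version of sorted_pairwise for a duplicate-free input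
lemma pv_sorted_pairwise_lt (l : List (String × String)) (hnd : l.Nodup) :
    (PySem.List.sorted l (fun p => toLex p) false).Pairwise
      (fun a b => (toLex a : Lex (String × String)) < toLex b) := by
  have hle := PySem.List.sorted_pairwise l (fun p => toLex p)
  have hne : (PySem.List.sorted l (fun p => toLex p) false).Nodup :=
    (PySem.List.sorted_perm l _ false).nodup_iff.mpr hnd
  exact (hle.and hne).imp (fun {a b} h =>
    lt_of_le_of_ne h.1 (fun he => h.2 (toLex.injective he)))

-- sorting a duplicate-free pool = sorting the < part, then the pivot, then the > part
lemma pv_sorted_split (pool : List (String × String)) (hnd : pool.Nodup)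
    (pivot : String × String) (hm : pivot ∈ pool) :
    PySem.List.sorted pool (fun p => toLex p) false
      = PySem.List.sorted (pool.filter (fun p => pvPairLt p pivot)) (fun p => toLex p) false
        ++ pivot :: PySem.List.sorted (pool.filter (fun p => pvPairLt pivot p)) (fun p => toLex p) false := by
  apply PySem.List.sorted_eq_of_perm_of_pairwise_lt
  · exact ((PySem.List.sorted_perm _ _ false).append
      ((PySem.List.sorted_perm _ _ false).cons pivot)).trans (pv_partition pool hnd pivot hm)
  · rw [List.pairwise_append]
    refine ⟨pv_sorted_pairwise_lt _ (hnd.filter _), ?_, ?_⟩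
    · rw [List.pairwise_cons]
      refine ⟨?_, pv_sorted_pairwise_lt _ (hnd.filter _)⟩
      intro a ha
      exact (pvPairLt_iff pivot a).mp
        (List.mem_filter.mp ((PySem.List.mem_sorted _ _ false a).mp ha)).2
    · intro a ha b hb
      have h1 := (pvPairLt_iff a pivot).mp
        (List.mem_filter.mp ((PySem.List.mem_sorted _ _ false a).mp ha)).2
      rcases List.mem_cons.mp hb with h | h
      · exact h ▸ h1
      · exact h1.trans ((pvPairLt_iff pivot b).mp
          (List.mem_filter.mp ((PySem.List.mem_sorted _ _ false b).mp h)).2)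

-- quickselect on a duplicate-free pool returns the j-th element of the sorted pool
lemma pvQsel_eq_sorted : ∀ (n : Nat) (pool : List (String × String)), pool.length = n →
    pool.Nodup → ∀ (j : Nat) (hj : j < pool.length),
    pvQsel pool (j : Int)
      = ((PySem.List.sorted pool (fun p => toLex p) false)[j]'(by
          rw [PySem.List.length_sorted]; exact hj)).2 := by
  intro n
  induction n using Nat.strong_induction_on with
  | _ n ih =>
  intro pool hlen hnd j hj
  have hpos : 0 < pool.length := lt_of_le_of_lt (Nat.zero_le j) hj
  have hidx : pool.length / 2 < pool.length := Nat.div_lt_self hpos one_lt_two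
  rw [pvQsel]
  split
  next hnone =>
    rw [List.getElem?_eq_getElem hidx] at hnone
    exact absurd hnone (by simp)
  next pivot hp =>
    have hmem : pivot ∈ pool := List.mem_of_getElem? hp
    have hsplit := pv_sorted_split pool hnd pivot hmem
    have hlenS : pool.length = (pool.filter (fun p => pvPairLt p pivot)).length + 1
        + (pool.filter (fun p => pvPairLt pivot p)).length := by
      have hc := congrArg List.length hsplit
      simp only [List.length_append, List.length_cons, PySem.List.length_sorted] at hc
      omega
    dsimp only
    split
    next hlt =>
      have hjSm : j < (pool.filter (fun p => pvPairLt p pivot)).length := by exact_mod_cast hlt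
      rw [ih (pool.filter (fun p => pvPairLt p pivot)).length (by omega) _ rfl
        (hnd.filter _) j hjSm]
      congr 1
      simp only [hsplit]
      exact (List.getElem_append_left (by
        rw [PySem.List.length_sorted]; exact hjSm)).symm
    next hlt =>
      split
      next heq =>
        have hjeq : j = (pool.filter (fun p => pvPairLt p pivot)).length := by exact_mod_cast heq
        simp only [hsplit]
        have h1 : (PySem.List.sorted (pool.filter (fun p => pvPairLt p pivot))
            (fun p => toLex p) false).length ≤ j := by
          rw [PySem.List.length_sorted]; omega
        rw [List.getElem_append_right h1]
        simp [hjeq]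
      next hne =>
        have hjgt : (pool.filter (fun p => pvPairLt p pivot)).length < j := by
          have h1 : ¬ ((j : Int) < ((pool.filter (fun p => pvPairLt p pivot)).length : Int)) := hlt
          have h2 : ¬ ((j : Int) = ((pool.filter (fun p => pvPairLt p pivot)).length : Int)) := hne
          omega
        have hcast : (j : Int) - (((pool.filter (fun p => pvPairLt p pivot)).length : Int) + 1)
            = ((j - (pool.filter (fun p => pvPairLt p pivot)).length - 1 : Nat) : Int) := by
          omega
        rw [hcast]
        rw [ih (pool.filter (fun p => pvPairLt pivot p)).length (by omega) _ rfl
          (hnd.filter _) (j - (pool.filter (fun p => pvPairLt p pivot)).length - 1) (by omega)]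
        congr 1
        simp only [hsplit]
        have h1 : (PySem.List.sorted (pool.filter (fun p => pvPairLt p pivot))
            (fun p => toLex p) false).length ≤ j := by
          rw [PySem.List.length_sorted]; omega
        rw [List.getElem_append_right h1]
        have h2 : j - (PySem.List.sorted (pool.filter (fun p => pvPairLt p pivot))
            (fun p => toLex p) false).length
            = (j - (pool.filter (fun p => pvPairLt p pivot)).length - 1) + 1 := by
          rw [PySem.List.length_sorted]; omega
        simp only [h2, List.getElem_cons_succ]

-- a set-building loop over f-images of the inputs is the f-image of the ordered dedup (f injective)
lemma pv_foldl_add_map {β : Type} [BEq β] [LawfulBEq β] (f : String → β)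
    (hinj : Function.Injective f) :
    ∀ (l : List String) (acc : List String),
    l.foldl (fun us s => PySem.Set.add us (f s)) (acc.map f)
      = (l.foldl PySem.Set.add acc).map f := by
  intro l
  induction l with
  | nil => intro acc; rfl
  | cons x t ih =>
    intro acc
    simp only [List.foldl_cons]
    have hadd : PySem.Set.add (acc.map f) (f x) = (PySem.Set.add acc x).map f := by
      simp only [PySem.Set.add]
      by_cases hx : x ∈ acc <;> simp [hx]
      · exact ⟨x, hx, rfl⟩
      · intro a ha he
        exact hx (hinj he ▸ ha)
    rw [hadd, ih]

-- A's pair set, in order, is the keyed image of the ordered dedup of the inputs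
lemma pv_setfold_eq_map (strings : List String) :
    strings.foldl (fun us s => PySem.Set.add us (pvSortChars s, s)) PySem.Set.empty
      = (PySem.List.dedup strings).map (fun s => (pvSortChars s, s)) := by
  have hinj : Function.Injective (fun s => ((pvSortChars s, s) : String × String)) :=
    fun a b h => congrArg Prod.snd h
  have h := pv_foldl_add_map _ hinj strings []
  simpa [PySem.List.dedup_eq_ofList, PySem.Set.ofList_eq_foldl, PySem.Set.empty] using h

lemma pv_main_eq (strings : List String) (k : Int) (hk : 1 ≤ k) :
    kth_unique_string strings k = kth_unique_string_alt strings k := by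
  simp only [kth_unique_string, kth_unique_string_alt]
  rw [pv_setfold_eq_map, pv_sorted2_eq_sorted_toLex]
  have hnd : ((PySem.List.dedup strings).map (fun s => (pvSortChars s, s))).Nodup :=
    (PySem.List.nodup_dedup strings).map (fun a b h => congrArg Prod.snd h)
  set pool := (PySem.List.dedup strings).map (fun s => (pvSortChars s, s)) with hpool
  have hplen : pool.length = (PySem.List.dedup strings).length := List.length_map _
  by_cases hle : k ≤ (pool.length : Int)
  · rw [if_pos (by rw [PySem.List.length_sorted]; exact hle)]
    rw [if_neg (by omega)]
    have hj1 : (((k - 1).toNat : Nat) : Int) = k - 1 := Int.toNat_of_nonneg (by omega)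
    have hj : (k - 1).toNat < pool.length := by omega
    rw [← hj1, PySem.List.pyGet?_natCast,
      List.getElem?_eq_getElem (by rw [PySem.List.length_sorted]; exact hj)]
    rw [pvQsel_eq_sorted pool.length pool rfl hnd (k - 1).toNat hj]
  · rw [if_neg (by rw [PySem.List.length_sorted]; exact hle)]
    rw [if_pos (by omega)]

-- ===== VERDICT (by name: the statement is the Claim_ definition above) =====
theorem kth_unique_string_spec : Claim_unchanged_kth_unique_string := by
  intro strings k _ _ hnD
  have hk : 1 ≤ k := by
    unfold D_kth_unique_string at hnD; omega
  exact pv_main_eq strings k hk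

theorem kth_unique_string_changed : Claim_changed_kth_unique_string := by
  unfold Claim_changed_kth_unique_string; decide
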